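-- pv_equiv track=rewrite | github.com/ulo1230/epq_cipher_program | ciphers/__utils__/common.py | arrange_text
-- ===== SOURCE A (Python) =====
-- def arrange_text(text, arrange_type, block):
-- 	t1 = ""
-- 	gap = int(len(text) / block)
--
-- 	if arrange_type == "column":
-- 		for i in range(gap):
-- 			for j in range(block):
-- 				t1 += text[j*gap + i]
-- 			t1 += "\n"
--
-- 	elif arrange_type == "row":
-- 		for i in range(gap):
-- 			for j in range(block):
-- 				t1 += text[i*block + j]
-- 			t1 += "\n"
--
-- 	return t1[:-1]
-- ===== SOURCE B (Python) =====
-- def arrange_text(text, arrange_type, block):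
--     gap = int(len(text) / block)
--     if arrange_type == "column":
--         segments = [text[k * gap:(k + 1) * gap] for k in range(block)]
--         return '\n'.join(''.join(col) for col in zip(*segments))
--     elif arrange_type == "row":
--         return '\n'.join(text[i * block:(i + 1) * block] for i in range(gap))
--     else:
--         return ''
-- ===== Notes on version B (the rewrite author's own statement) =====
-- stated objective: idiomatic
-- what changed: Replaces the char-by-char nested index loops with whole-string slicing: the row branch joins gap slices of length block, and the column branch builds block segments and transposes them with zip(*segments), joining the rows with newlines.
import Mathlib
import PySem

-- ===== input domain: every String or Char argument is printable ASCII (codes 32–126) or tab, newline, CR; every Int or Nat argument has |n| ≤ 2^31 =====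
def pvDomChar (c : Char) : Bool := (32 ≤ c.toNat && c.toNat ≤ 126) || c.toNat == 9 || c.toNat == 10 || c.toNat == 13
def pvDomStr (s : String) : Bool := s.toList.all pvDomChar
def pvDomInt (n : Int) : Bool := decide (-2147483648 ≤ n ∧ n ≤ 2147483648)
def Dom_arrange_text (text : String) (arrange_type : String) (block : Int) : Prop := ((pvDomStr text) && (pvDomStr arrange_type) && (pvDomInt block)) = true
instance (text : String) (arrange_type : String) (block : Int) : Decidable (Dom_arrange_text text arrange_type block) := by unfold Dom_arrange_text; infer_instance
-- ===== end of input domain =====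

-- B rearranges the text by whole-string slices and a zip-style transpose instead of A's
-- char-by-char nested index loops; equal return value for every block ≠ 0 (A raises on block = 0).


-- ===== PORT A =====
-- literal transliteration of A; `int(len(text)/block)` is PySem.Int.truncdiv (exact for |len|,|block| < 2^53);
-- text[idx] never goes out of range when block ≠ 0 (Pre_), so pyGetD's default is unreachable there
def arrange_text (text : String) (arrange_type : String) (block : Int) : String :=
  let cs := text.toList
  let gap : Int := PySem.Int.truncdiv (cs.length : Int) block
  let t1 : List Char :=
    if arrange_type = "column" then
      (PySem.List.pyRange 0 gap).foldl (fun a i =>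
        ((PySem.List.pyRange 0 block).foldl (fun a2 j =>
            a2 ++ [PySem.List.pyGetD cs (j * gap + i) ' ']) a) ++ ['\n']) []
    else if arrange_type = "row" then
      (PySem.List.pyRange 0 gap).foldl (fun a i =>
        ((PySem.List.pyRange 0 block).foldl (fun a2 j =>
            a2 ++ [PySem.List.pyGetD cs (i * block + j) ' ']) a) ++ ['\n']) []
    else []
  String.ofList (PySem.List.slice t1 none (some (-1)))

-- ===== PORT B =====
-- zip(*segments): one row per index up to the shortest segment (getD's default is unreachable below that length)
def pvZipRows (segs : List (List Char)) : List (List Char) :=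
  match segs with
  | [] => []
  | s0 :: rest =>
      (List.range (rest.foldl (fun a s => min a s.length) s0.length)).map
        (fun i => (s0 :: rest).map (fun s => s.getD i ' '))

def arrange_text_alt (text : String) (arrange_type : String) (block : Int) : String :=
  let cs := text.toList
  let gap : Int := PySem.Int.truncdiv (cs.length : Int) block
  if arrange_type = "column" then
    let segs := (PySem.List.pyRange 0 block).map
      (fun k => PySem.List.slice cs (some (k * gap)) (some ((k + 1) * gap)))
    String.ofList (List.intercalate ['\n'] (pvZipRows segs))
  else if arrange_type = "row" then
    String.ofList (List.intercalate ['\n']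
      ((PySem.List.pyRange 0 gap).map
        (fun i => PySem.List.slice cs (some (i * block)) (some ((i + 1) * block)))))
  else ""

-- ===== PRECONDITION & SPEC =====
-- Pre_ excludes exactly block = 0, where A raises ZeroDivisionError
def Pre_arrange_text (text : String) (arrange_type : String) (block : Int) : Prop := block ≠ 0
instance (text : String) (arrange_type : String) (block : Int) : Decidable (Pre_arrange_text text arrange_type block) := by unfold Pre_arrange_text; infer_instance
def pvWitness_arrange_text : String × String × Int := ("abcdef", "column", 2)
def Spec_arrange_text (text : String) (arrange_type : String) (block : Int) (out : String) : Prop := out = arrange_text_alt text arrange_type block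
instance (text : String) (arrange_type : String) (block : Int) (out : String) : Decidable (Spec_arrange_text text arrange_type block out) := by unfold Spec_arrange_text; infer_instance

-- ===== CLAIM (what is proved, stated in full; the proofs are below) =====
def Claim_equal_arrange_text : Prop := ∀ (text : String) (arrange_type : String) (block : Int), Dom_arrange_text text arrange_type block → Pre_arrange_text text arrange_type block → Spec_arrange_text text arrange_type block (arrange_text text arrange_type block)

-- ===== LEMMAS AND PROOFS =====

theorem pv_slice_neg_one (t1 : List Char) : PySem.List.slice t1 none (some (-1)) = t1.dropLast := by
  have h := PySem.Str.slice_to_neg_one (String.ofList t1)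
  simpa using h

theorem pv_pyRange_nonpos (z : Int) (hz : z ≤ 0) : PySem.List.pyRange 0 z = [] := by
  rw [PySem.List.pyRange_of_pos 0 z one_pos, if_neg (by omega : ¬ (0:Int) < z)]
  simp

theorem pv_tdiv_nonpos (a b : Int) (ha : 0 ≤ a) (hb : b < 0) : a.tdiv b ≤ 0 := by
  have h1 : 0 ≤ a.tdiv (-b) := Int.tdiv_nonneg ha (by omega)
  have h2 : a.tdiv (-b) = -(a.tdiv b) := Int.tdiv_neg a b
  omega

-- joining newline-terminated rows and dropping the trailing newline is intercalating
theorem pv_flat_dropLast {ι : Type} (c : Char) (f : ι → List Char) (l : List ι) :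
    (List.flatMap (fun i => f i ++ [c]) l).dropLast = List.intercalate [c] (l.map f) := by
  induction l with
  | nil => simp [List.intercalate]
  | cons x xs ih =>
    cases xs with
    | nil => simp [List.intercalate]
    | cons y ys =>
      rw [List.flatMap_cons, List.dropLast_append_of_ne_nil (by simp [List.flatMap_cons]), ih]
      simp [List.intercalate]

-- a fully in-range slice, element by element
theorem pv_slice_as_map (cs : List Char) (a t : Nat) (h : a + t ≤ cs.length) :
    (cs.drop a).take t = (List.range t).map (fun j => cs.getD (a + j) ' ') := by
  apply List.ext_getElem
  · simp; omega
  · intro i h1 h2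
    have hi : i < t := by simpa using h2
    have hai : a + i < cs.length := by omega
    simp [List.getElem_take, List.getElem_drop, List.getD_eq_getElem?_getD,
      List.getElem?_eq_getElem hai]

theorem pv_foldl_min (g : Nat) (rest : List (List Char)) (h : ∀ s ∈ rest, s.length = g) :
    rest.foldl (fun a s => min a s.length) g = g := by
  induction rest with
  | nil => rfl
  | cons s l ih =>
    simp only [List.foldl_cons, h s (by simp), min_self]
    exact ih (fun s hs => h s (by simp [hs]))

theorem pv_zipRows_eq (segs : List (List Char)) (g : Nat) (hne : segs ≠ [])
    (hl : ∀ s ∈ segs, s.length = g) :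
    pvZipRows segs = (List.range g).map (fun i => segs.map (fun s => s.getD i ' ')) := by
  match segs with
  | [] => exact absurd rfl hne
  | s0 :: rest =>
    have h0 : s0.length = g := hl s0 (by simp)
    have : rest.foldl (fun a s => min a s.length) s0.length = g := by
      rw [h0]; exact pv_foldl_min g rest (fun s hs => hl s (by simp [hs]))
    simp only [pvZipRows, this]

theorem pv_colA (cs : List Char) (g b : Nat) :
    ((PySem.List.pyRange 0 (g:Int)).foldl (fun a i =>
        ((PySem.List.pyRange 0 (b:Int)).foldl (fun a2 j =>
            a2 ++ [PySem.List.pyGetD cs (j * (g:Int) + i) ' ']) a) ++ ['\n']) []).dropLast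
    = List.intercalate ['\n']
        ((List.range g).map (fun i => (List.range b).map (fun j => cs.getD (j*g + i) ' '))) := by
  simp only [PySem.List.foldl_append_singleton_eq_map, List.append_assoc,
    PySem.List.foldl_append_eq_flatMap, List.nil_append,
    PySem.List.pyRange_zero_natCast, List.flatMap_map, List.map_map]
  have hcast : ∀ i j : Nat, PySem.List.pyGetD cs ((j:Int) * (g:Int) + (i:Int)) ' ' = cs.getD (j*g+i) ' ' := by
    intro i j
    rw [show ((j:Int) * (g:Int) + (i:Int)) = ((j*g+i : Nat) : Int) by push_cast; ring,
      PySem.List.pyGetD_natCast]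
  simp only [Function.comp_def, hcast]
  exact pv_flat_dropLast '\n' _ _

theorem pv_rowA (cs : List Char) (g b : Nat) :
    ((PySem.List.pyRange 0 (g:Int)).foldl (fun a i =>
        ((PySem.List.pyRange 0 (b:Int)).foldl (fun a2 j =>
            a2 ++ [PySem.List.pyGetD cs (i * (b:Int) + j) ' ']) a) ++ ['\n']) []).dropLast
    = List.intercalate ['\n']
        ((List.range g).map (fun i => (List.range b).map (fun j => cs.getD (i*b + j) ' '))) := by
  simp only [PySem.List.foldl_append_singleton_eq_map, List.append_assoc,
    PySem.List.foldl_append_eq_flatMap, List.nil_append,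
    PySem.List.pyRange_zero_natCast, List.flatMap_map, List.map_map]
  have hcast : ∀ i j : Nat, PySem.List.pyGetD cs ((i:Int) * (b:Int) + (j:Int)) ' ' = cs.getD (i*b+j) ' ' := by
    intro i j
    rw [show ((i:Int) * (b:Int) + (j:Int)) = ((i*b+j : Nat) : Int) by push_cast; ring,
      PySem.List.pyGetD_natCast]
  simp only [Function.comp_def, hcast]
  exact pv_flat_dropLast '\n' _ _

theorem pv_seg (cs : List Char) (g k : Nat) (h : k * g + g ≤ cs.length) :
    PySem.List.slice cs (some ((k:Int) * (g:Int))) (some (((k:Int) + 1) * (g:Int)))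
    = (List.range g).map (fun j => cs.getD (k*g + j) ' ') := by
  rw [show ((k:Int) * (g:Int)) = ((k*g : Nat) : Int) by push_cast; ring,
    show (((k:Int) + 1) * (g:Int)) = (((k+1)*g : Nat) : Int) by push_cast; ring,
    PySem.List.slice_natCast, Nat.succ_mul, Nat.add_sub_cancel_left]
  exact pv_slice_as_map cs (k*g) g h

theorem pv_colB (cs : List Char) (g b : Nat) (hb : 0 < b) (hbg : b * g ≤ cs.length) :
    pvZipRows ((PySem.List.pyRange 0 (b:Int)).map
        (fun k => PySem.List.slice cs (some (k * (g:Int))) (some ((k + 1) * (g:Int)))))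
    = (List.range g).map (fun i => (List.range b).map (fun k => cs.getD (k*g + i) ' ')) := by
  rw [PySem.List.pyRange_zero_natCast, List.map_map]
  have hseg : ∀ k ∈ List.range b,
      PySem.List.slice cs (some ((k:Int) * (g:Int))) (some (((k:Int) + 1) * (g:Int)))
      = (List.range g).map (fun j => cs.getD (k*g + j) ' ') := by
    intro k hk
    have hk' : k < b := List.mem_range.mp hk
    apply pv_seg
    calc k * g + g = (k+1) * g := (Nat.succ_mul k g).symm
      _ ≤ b * g := Nat.mul_le_mul_right g (by omega)
      _ ≤ cs.length := hbg
  rw [show ((List.range b).map ((fun k => PySem.List.slice cs (some (k * (g:Int))) (some ((k + 1) * (g:Int)))) ∘ (fun k : Nat => (k:Int))))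
      = (List.range b).map (fun k : Nat => (List.range g).map (fun j => cs.getD (k*g + j) ' ')) from
    List.map_congr_left (fun k hk => hseg k hk)]
  rw [pv_zipRows_eq _ g (List.ne_nil_of_length_pos (by simp [hb])) (by
    intro s hs
    simp only [List.mem_map, List.mem_range] at hs
    obtain ⟨k, _, rfl⟩ := hs
    simp)]
  apply List.map_congr_left
  intro i hi
  have hig : i < g := List.mem_range.mp hi
  rw [List.map_map]
  apply List.map_congr_left
  intro k hk
  simp [List.getD_eq_getElem?_getD, hig]

theorem pv_rowB (cs : List Char) (g b : Nat) (hgb : g * b ≤ cs.length) :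
    (PySem.List.pyRange 0 (g:Int)).map
        (fun i => PySem.List.slice cs (some (i * (b:Int))) (some ((i + 1) * (b:Int))))
    = (List.range g).map (fun i => (List.range b).map (fun j => cs.getD (i*b + j) ' ')) := by
  rw [PySem.List.pyRange_zero_natCast, List.map_map]
  apply List.map_congr_left
  intro i hi
  have hig : i < g := List.mem_range.mp hi
  show PySem.List.slice cs (some ((i:Int) * (b:Int))) (some (((i:Int) + 1) * (b:Int))) = _
  apply pv_seg
  calc i * b + b = (i+1) * b := (Nat.succ_mul i b).symm
    _ ≤ g * b := Nat.mul_le_mul_right b (by omega)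
    _ ≤ cs.length := hgb

-- ===== VERDICT (by name: the statement is the Claim_ definition above) =====
theorem arrange_text_spec : Claim_equal_arrange_text := by
  intro text atype block _ hpre
  unfold Pre_arrange_text at hpre
  unfold Spec_arrange_text
  rcases lt_or_gt_of_ne hpre with hneg | hpos
  · -- block < 0: gap ≤ 0, so every loop/range is empty and both sides return ""
    have hgap : PySem.Int.truncdiv ((text.toList.length : Nat) : Int) block ≤ 0 :=
      pv_tdiv_nonpos _ _ (by positivity) hneg
    have e1 : PySem.List.pyRange 0 (PySem.Int.truncdiv ((text.toList.length : Nat) : Int) block) = [] :=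
      pv_pyRange_nonpos _ hgap
    have e2 : PySem.List.pyRange 0 block = [] := pv_pyRange_nonpos _ (by omega)
    simp only [arrange_text, arrange_text_alt, e1, e2]
    split_ifs <;> simp [pvZipRows, pv_slice_neg_one, List.intercalate]
  · -- block > 0
    obtain ⟨b, rfl⟩ : ∃ b : Nat, block = (b:Nat) := ⟨block.toNat, (Int.toNat_of_nonneg hpos.le).symm⟩
    have hb : 0 < b := by exact_mod_cast hpos
    have hgap : PySem.Int.truncdiv ((text.toList.length : Nat) : Int) ((b:Nat) : Int)
        = ((text.toList.length / b : Nat) : Int) := rfl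
    have hbg : b * (text.toList.length / b) ≤ text.toList.length := by
      rw [mul_comm]; exact Nat.div_mul_le_self _ _
    by_cases hc : atype = "column"
    · simp only [arrange_text, arrange_text_alt, hgap, if_pos hc]
      rw [pv_slice_neg_one, pv_colA, pv_colB _ _ _ hb hbg]
    · by_cases hr : atype = "row"
      · simp only [arrange_text, arrange_text_alt, hgap, if_neg hc, if_pos hr]
        rw [pv_slice_neg_one, pv_rowA, pv_rowB _ _ _ (by rw [mul_comm] at hbg; exact hbg)]
      · simp only [arrange_text, arrange_text_alt, hgap, if_neg hc, if_neg hr]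
        rw [pv_slice_neg_one]
        rfl
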